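-- pv_equiv track=rewrite | github.com/doukoure2018/bic-gn | app/services/simprix_service.py | _match_product_code
-- ===== SOURCE A (Python) =====
-- def _match_product_code(nom: str) -> str | None:
--     """Match a product name to our internal code."""
--     nom_lower = nom.lower()
--     mapping = [
--         ("riz", "5%", "50", "RIZ_5_50"),
--         ("riz", "25%", "50", "RIZ_25_50"),
--         ("riz", "5%", "25", "RIZ_5_25"),
--         ("huile", "", "", "HUILE_20"),
--         ("oignon", "", "", "OIGNON_25"),
--         ("poulet entier", "", "", "POULET_10"),
--         ("cuisse", "", "", "CUISSE_10"),
--         ("sucre", "", "", "SUCRE_50"),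
--         ("farine", "", "", "FARINE_50"),
--         ("lait", "", "", "LAIT_25"),
--     ]
--     for keywords in mapping:
--         *terms, code = keywords
--         if all(t in nom_lower for t in terms if t):
--             return code
--     return None
-- ===== SOURCE B (Python) =====
-- KEYWORDS = [
--     "riz", "5%", "25%", "50", "25",
--     "huile", "oignon", "poulet entier", "cuisse", "sucre", "farine", "lait",
-- ]
-- SINGLES = [
--     ("huile", "HUILE_20"),
--     ("oignon", "OIGNON_25"),
--     ("poulet entier", "POULET_10"),
--     ("cuisse", "CUISSE_10"),
--     ("sucre", "SUCRE_50"),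
--     ("farine", "FARINE_50"),
--     ("lait", "LAIT_25"),
-- ]
--
--
-- def _match_product_code(nom: str) -> str | None:
--     """Match a product name to our internal code."""
--     s = nom.lower()
--     # Single sweep over the text: at each position collect every keyword starting
--     # there, so the decision below is pure set lookups (no substring scans).
--     found = {t for i in range(len(s) + 1) for t in KEYWORDS if s.startswith(t, i)}
--     if "riz" in found:
--         if "5%" in found and "50" in found:
--             return "RIZ_5_50"
--         if "25%" in found and "50" in found:
--             return "RIZ_25_50"
--         if "5%" in found and "25" in found:
--             return "RIZ_5_25"
--     for kw, code in SINGLES: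
--         if kw in found:
--             return code
--     return None
-- ===== Notes on version B (the rewrite author's own statement) =====
-- stated objective: alternative
-- what changed: Instead of looping over the rule table and scanning the name once per rule term, B makes a single position sweep over the lowered name building the set of all occurring keywords, then decides the code by pure set lookups (nested riz rules first, then the single-keyword priority list).
import Mathlib
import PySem

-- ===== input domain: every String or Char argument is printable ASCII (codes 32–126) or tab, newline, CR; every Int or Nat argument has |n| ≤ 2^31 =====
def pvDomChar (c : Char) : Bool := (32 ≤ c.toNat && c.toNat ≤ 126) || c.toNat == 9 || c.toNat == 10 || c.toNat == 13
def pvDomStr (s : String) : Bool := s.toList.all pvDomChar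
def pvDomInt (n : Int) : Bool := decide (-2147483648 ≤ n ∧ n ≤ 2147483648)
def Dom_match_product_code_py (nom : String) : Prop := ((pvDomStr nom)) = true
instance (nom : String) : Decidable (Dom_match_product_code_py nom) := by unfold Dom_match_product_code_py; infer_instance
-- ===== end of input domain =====

-- B replaces A's per-rule substring loop by ONE sweep over the text that collects every keyword
-- starting at each position into a set, then decides by pure set lookups; objective: alternative.


-- ===== PORT A =====
-- the mapping list of A: (term1, term2, term3, code)
def pvMapping : List (String × String × String × String) :=
  [("riz", "5%", "50", "RIZ_5_50"),
   ("riz", "25%", "50", "RIZ_25_50"),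
   ("riz", "5%", "25", "RIZ_5_25"),
   ("huile", "", "", "HUILE_20"),
   ("oignon", "", "", "OIGNON_25"),
   ("poulet entier", "", "", "POULET_10"),
   ("cuisse", "", "", "CUISSE_10"),
   ("sucre", "", "", "SUCRE_50"),
   ("farine", "", "", "FARINE_50"),
   ("lait", "", "", "LAIT_25")]

-- the 'for keywords in mapping: … return code' loop with early return
def pvALoop (nomLower : String) : List (String × String × String × String) → Option String
  | [] => none
  | (t1, t2, t3, code) :: rest =>
      -- *terms, code = keywords;  all(t in nom_lower for t in terms if t)
      if ([t1, t2, t3].filter (fun t => t ≠ "")).all (fun t => PySem.Str.isIn t nomLower) then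
        some code
      else pvALoop nomLower rest

def match_product_code_py (nom : String) : Option String :=
  pvALoop (PySem.Str.lower nom) pvMapping

-- ===== PORT B =====
def pvKeywords : List String :=
  ["riz", "5%", "25%", "50", "25",
   "huile", "oignon", "poulet entier", "cuisse", "sucre", "farine", "lait"]

def pvSinglesB : List (String × String) :=
  [("huile", "HUILE_20"), ("oignon", "OIGNON_25"), ("poulet entier", "POULET_10"),
   ("cuisse", "CUISSE_10"), ("sucre", "SUCRE_50"), ("farine", "FARINE_50"), ("lait", "LAIT_25")]

-- found = {t for i in range(len(s)+1) for t in KEYWORDS if s.startswith(t, i)}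
-- s.startswith(t, i) ported by hand as t.toList.isPrefixOf (s.toList.drop i.toNat): exact for 0 ≤ i,
-- and pyRange only produces nonnegative i here.
def pvFound (s : String) : PySem.Set String :=
  PySem.Set.ofList
    ((PySem.List.pyRange 0 (PySem.Str.len s + 1) 1).flatMap
      (fun i => pvKeywords.filter (fun t => t.toList.isPrefixOf (s.toList.drop i.toNat))))

-- for kw, code in SINGLES: if kw in found: return code
def pvSinglesLoop (found : PySem.Set String) : List (String × String) → Option String
  | [] => none
  | (kw, code) :: rest =>
      if PySem.Set.contains found kw then some code else pvSinglesLoop found rest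

def match_product_code_py_alt (nom : String) : Option String :=
  let s := PySem.Str.lower nom
  let found := pvFound s
  if PySem.Set.contains found "riz" then
    if PySem.Set.contains found "5%" && PySem.Set.contains found "50" then some "RIZ_5_50"
    else if PySem.Set.contains found "25%" && PySem.Set.contains found "50" then some "RIZ_25_50"
    else if PySem.Set.contains found "5%" && PySem.Set.contains found "25" then some "RIZ_5_25"
    else pvSinglesLoop found pvSinglesB   -- a 'riz' name with no sub-rule falls through
  else pvSinglesLoop found pvSinglesB

-- ===== PRECONDITION & SPEC =====
def Spec_match_product_code_py (nom : String) (out : Option String) : Prop := out = match_product_code_py_alt nom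
instance (nom : String) (out : Option String) : Decidable (Spec_match_product_code_py nom out) := by unfold Spec_match_product_code_py; infer_instance

-- ===== CLAIM (what is proved, stated in full; the proofs are below) =====
def Claim_equal_match_product_code_py : Prop := ∀ (nom : String), Dom_match_product_code_py nom → Spec_match_product_code_py nom (match_product_code_py nom)

-- ===== LEMMAS AND PROOFS =====

-- B's position sweep finds exactly the keywords occurring as substrings.
theorem contains_pvFound (s t : String) (ht : t ∈ pvKeywords) :
    PySem.Set.contains (pvFound s) t = PySem.Str.isIn t s := by
  rw [Bool.eq_iff_iff]
  unfold PySem.Set.contains pvFound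
  rw [List.contains_iff_mem, PySem.Set.mem_ofList, List.mem_flatMap]
  constructor
  · rintro ⟨i, hi, hmem⟩
    rw [List.mem_filter] at hmem
    have hpre : t.toList <+: s.toList.drop i.toNat :=
      List.isPrefixOf_iff_prefix.mp hmem.2
    exact (PySem.Chars.exists_prefix_drop_iff_isIn t.toList s.toList).mp ⟨i.toNat, hpre⟩
  · intro h
    obtain ⟨pre, suf, heq⟩ := (PySem.Str.isIn_iff_infix t s).mp h
    refine ⟨(pre.length : Int), ?_, ?_⟩
    · rw [PySem.List.mem_pyRange_one]
      have hlen : pre.length ≤ s.toList.length := by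
        rw [← heq]; simp only [List.length_append]; omega
      simp only [PySem.Str.len]
      omega
    · rw [List.mem_filter]
      refine ⟨ht, List.isPrefixOf_iff_prefix.mpr ?_⟩
      have : s.toList.drop pre.length = t.toList ++ suf := by
        rw [← heq, List.append_assoc, List.drop_left]
      simp only [Int.toNat_natCast, this]
      exact ⟨suf, rfl⟩

-- Both programs are determined by which keywords occur in the lowered name; case on all of them.
theorem match_product_code_eq (nom : String) :
    match_product_code_py nom = match_product_code_py_alt nom := by
  unfold match_product_code_py match_product_code_py_alt
  generalize PySem.Str.lower nom = s
  have h1 : (["riz", "5%", "50"].filter (fun t => t ≠ "")) = ["riz", "5%", "50"] := by decide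
  have h2 : (["riz", "25%", "50"].filter (fun t => t ≠ "")) = ["riz", "25%", "50"] := by decide
  have h3 : (["riz", "5%", "25"].filter (fun t => t ≠ "")) = ["riz", "5%", "25"] := by decide
  have h4 : (["huile", "", ""].filter (fun t => t ≠ "")) = ["huile"] := by decide
  have h5 : (["oignon", "", ""].filter (fun t => t ≠ "")) = ["oignon"] := by decide
  have h6 : (["poulet entier", "", ""].filter (fun t => t ≠ "")) = ["poulet entier"] := by decide
  have h7 : (["cuisse", "", ""].filter (fun t => t ≠ "")) = ["cuisse"] := by decide
  have h8 : (["sucre", "", ""].filter (fun t => t ≠ "")) = ["sucre"] := by decide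
  have h9 : (["farine", "", ""].filter (fun t => t ≠ "")) = ["farine"] := by decide
  have h10 : (["lait", "", ""].filter (fun t => t ≠ "")) = ["lait"] := by decide
  simp only [pvMapping, pvALoop, pvSinglesB, pvSinglesLoop, h1, h2, h3, h4, h5, h6, h7, h8, h9, h10,
    List.all_cons, List.all_nil, Bool.and_true]
  rw [contains_pvFound s "riz" (by decide), contains_pvFound s "5%" (by decide),
    contains_pvFound s "25%" (by decide), contains_pvFound s "50" (by decide),
    contains_pvFound s "25" (by decide), contains_pvFound s "huile" (by decide),
    contains_pvFound s "oignon" (by decide), contains_pvFound s "poulet entier" (by decide),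
    contains_pvFound s "cuisse" (by decide), contains_pvFound s "sucre" (by decide),
    contains_pvFound s "farine" (by decide), contains_pvFound s "lait" (by decide)]
  generalize PySem.Str.isIn "riz" s = b1
  generalize PySem.Str.isIn "5%" s = b2
  generalize PySem.Str.isIn "50" s = b3
  generalize PySem.Str.isIn "25%" s = b4
  generalize PySem.Str.isIn "25" s = b5
  generalize PySem.Str.isIn "huile" s = b6
  generalize PySem.Str.isIn "oignon" s = b7
  generalize PySem.Str.isIn "poulet entier" s = b8
  generalize PySem.Str.isIn "cuisse" s = b9
  generalize PySem.Str.isIn "sucre" s = b10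
  generalize PySem.Str.isIn "farine" s = b11
  generalize PySem.Str.isIn "lait" s = b12
  cases b1 <;> cases b2 <;> cases b3 <;> cases b4 <;> cases b5 <;> cases b6 <;> cases b7 <;>
    cases b8 <;> cases b9 <;> cases b10 <;> cases b11 <;> cases b12 <;> rfl

-- ===== VERDICT (by name: the statement is the Claim_ definition above) =====
theorem match_product_code_py_spec : Claim_equal_match_product_code_py := by
  intro nom _
  exact match_product_code_eq nom
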